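-- pv_equiv track=rewrite | github.com/sheric98/RustGB | src/raw_commands/cmd_gen.py | hard_extract_n_r
-- ===== SOURCE A (Python) =====
-- REGS = {
--     'A',
--     'B',
--     'C',
--     'D',
--     'E',
--     'F',
--     'H',
--     'L',
--     'AF',
--     'BC',
--     'DE',
--     'HL',
--     '*',
--     'n',
--     'nn',
--     'SP',
--     'PC',
--     'cc',
--     'b',
--     'r',
--     '#',
--     'r1',
--     'r2',
--     'Cc',
--     'NZ',
--     'Z',
--     'NC',
-- }
--
-- def hard_extract_n_r(line, n):
--     if n == 1:
--         if line in REGS: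
--             return [[line]]
--         else:
--             None
--     else:
--         possibles = []
--         for reg in REGS:
--             if line[:len(reg)] == reg:
--                 remain = line[len(reg):]
--                 possible = hard_extract_n_r(remain, n - 1)
--                 if possible is not None:
--                     updated = [[reg] + pos for pos in possible]
--                     possibles.extend(updated)
--         if len(possibles) == 0:
--             return None
--         else:
--             return possibles
-- ===== SOURCE B (Python) =====
-- # Iterative level-by-level (BFS worklist) enumeration instead of suffix recursion.
-- REGS_ORDER = (
--     'A', 'B', 'C', 'D', 'E', 'F', 'H', 'L',
--     'AF', 'BC', 'DE', 'HL', '*', 'n', 'nn', 'SP', 'PC',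
--     'cc', 'b', 'r', '#', 'r1', 'r2', 'Cc', 'NZ', 'Z', 'NC',
-- )
--
-- def hard_extract_n_r(line, n):
--     if n < 1:
--         return None
--     frontier = [([], line)]
--     for _ in range(n):
--         if not frontier:
--             break
--         frontier = [
--             (toks + [reg], rem[len(reg):])
--             for toks, rem in frontier
--             for reg in REGS_ORDER
--             if rem.startswith(reg)
--         ]
--     result = [toks for toks, rem in frontier if rem == '']
--     return result if result else None
-- ===== Notes on version B (the rewrite author's own statement) =====
-- stated objective: alternative
-- what changed: Replaces A's suffix recursion (DFS over REGS at each split point) with an iterative breadth-first worklist of (tokens, remaining) partial decompositions expanded exactly n rounds and filtered for exhausted remainders; REGS is iterated in a fixed tuple order so B's output is hash-seed independent.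
import Mathlib
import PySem

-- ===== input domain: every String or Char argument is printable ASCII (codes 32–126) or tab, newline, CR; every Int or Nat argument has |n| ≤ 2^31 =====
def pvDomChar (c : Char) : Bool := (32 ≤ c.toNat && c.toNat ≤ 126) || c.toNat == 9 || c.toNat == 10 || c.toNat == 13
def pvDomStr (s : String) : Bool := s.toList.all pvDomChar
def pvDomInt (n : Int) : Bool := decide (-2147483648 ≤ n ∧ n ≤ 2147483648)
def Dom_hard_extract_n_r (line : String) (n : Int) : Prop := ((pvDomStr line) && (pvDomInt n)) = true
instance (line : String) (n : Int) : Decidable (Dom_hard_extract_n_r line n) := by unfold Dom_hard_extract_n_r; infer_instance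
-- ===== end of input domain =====

-- B replaces A's suffix recursion by an iterative n-round worklist of partial decompositions
-- (a different decomposition of the same task, same cost); the two return the same list.


-- ===== PORT A =====
-- the module constant REGS (a Python set; iterated here in the literal's insertion order —
-- the Python set's iteration order is interpreter-dependent, outputs are compared as sets)
def pvRegsA : List (List Char) :=
  [['A'], ['B'], ['C'], ['D'], ['E'], ['F'], ['H'], ['L'],
   ['A','F'], ['B','C'], ['D','E'], ['H','L'], ['*'], ['n'], ['n','n'], ['S','P'], ['P','C'],
   ['c','c'], ['b'], ['r'], ['#'], ['r','1'], ['r','2'], ['C','c'], ['N','Z'], ['Z'], ['N','C']]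

mutual
-- the recursive body of A, over the line's characters
def pvHardAux (line : List Char) (n : Int) : Option (List (List String)) :=
  if n = 1 then
    if pvRegsA.contains line then some [[String.ofList line]] else none
  else
    let possibles := pvGoRegs line n pvRegsA
    if possibles.length = 0 then none else some possibles
termination_by (line.length, pvRegsA.length + 1)

-- the 'for reg in REGS' loop accumulating 'possibles' (the 'reg ≠ []' conjunct is a totality
-- guard: every member of REGS is nonempty, so it never changes the computed value)
def pvGoRegs (line : List Char) (n : Int) : List (List Char) → List (List String)
  | [] => []
  | reg :: rest =>
      (if h : reg ≠ [] ∧ line.take reg.length = reg then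
         match pvHardAux (line.drop reg.length) (n - 1) with
         | none => []
         | some possible => possible.map (fun pos => String.ofList reg :: pos)
       else []) ++ pvGoRegs line n rest
termination_by regs => (line.length, regs.length)
decreasing_by
  · have h1 : reg.length ≤ line.length := by
      have := congrArg List.length h.2
      simp at this
      omega
    have h2 : 0 < reg.length := List.length_pos_of_ne_nil h.1
    simp [Prod.lex_iff]
    omega
  · simp [Prod.lex_iff]
end

def hard_extract_n_r (line : String) (n : Int) : Option (List (List String)) :=
  pvHardAux line.toList n

-- ===== PORT B =====
-- B's REGS_ORDER tuple (same elements, fixed order)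
def pvRegsB : List (List Char) :=
  [['A'], ['B'], ['C'], ['D'], ['E'], ['F'], ['H'], ['L'],
   ['A','F'], ['B','C'], ['D','E'], ['H','L'], ['*'], ['n'], ['n','n'], ['S','P'], ['P','C'],
   ['c','c'], ['b'], ['r'], ['#'], ['r','1'], ['r','2'], ['C','c'], ['N','Z'], ['Z'], ['N','C']]

-- one round: expand every partial decomposition by every reg that prefixes its remainder
def pvStep (fr : List (List String × List Char)) : List (List String × List Char) :=
  fr.flatMap (fun p => pvRegsB.filterMap (fun reg =>
    if reg.isPrefixOf p.2 then some (p.1 ++ [String.ofList reg], p.2.drop reg.length) else none))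

-- the 'for _ in range(n): if not frontier: break; …' loop, as fuel recursion on the round count
def pvLoop : Nat → List (List String × List Char) → List (List String × List Char)
  | 0, fr => fr
  | Nat.succ k, fr => if fr = [] then fr else pvLoop k (pvStep fr)

def hard_extract_n_r_alt (line : String) (n : Int) : Option (List (List String)) :=
  if n < 1 then none
  else
    let final := pvLoop n.toNat [([], line.toList)]
    let result := final.filterMap (fun p => if p.2 = [] then some p.1 else none)
    if result = [] then none else some result

-- ===== PRECONDITION & SPEC =====
def Spec_hard_extract_n_r (line : String) (n : Int) (out : Option (List (List String))) : Prop := out = hard_extract_n_r_alt line n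
instance (line : String) (n : Int) (out : Option (List (List String))) : Decidable (Spec_hard_extract_n_r line n out) := by unfold Spec_hard_extract_n_r; infer_instance

-- ===== CLAIM (what is proved, stated in full; the proofs are below) =====
def Claim_equal_hard_extract_n_r : Prop := ∀ (line : String) (n : Int), Dom_hard_extract_n_r line n → Spec_hard_extract_n_r line n (hard_extract_n_r line n)

-- ===== LEMMAS AND PROOFS =====

-- the two register tables are the same list
theorem pvRegsB_eq : pvRegsB = pvRegsA := rfl

-- every member of REGS is a nonempty string
theorem pvRegsA_ne_nil : ∀ reg ∈ pvRegsA, reg ≠ ([] : List Char) := by decide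

theorem pvRegsA_nodup : pvRegsA.Nodup := by decide

-- B's collected decompositions after k rounds starting from a bare remainder s
def pvRes (k : Nat) (s : List Char) : List (List String) :=
  (pvStep^[k] [(([] : List String), s)]).filterMap (fun p => if p.2 = [] then some p.1 else none)

theorem pvRes_zero (s : List Char) : pvRes 0 s = if s = [] then [[]] else [] := by
  by_cases h : s = [] <;> simp [pvRes, h]

theorem pvStep_iterate_nil (k : Nat) : pvStep^[k] ([] : List (List String × List Char)) = [] := by
  induction k with
  | zero => rfl
  | succ k ih => rw [Function.iterate_succ_apply]; exact ih

theorem pvLoop_eq_iterate (k : Nat) :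
    ∀ fr : List (List String × List Char), pvLoop k fr = pvStep^[k] fr := by
  induction k with
  | zero => intro fr; rfl
  | succ k ih =>
      intro fr
      rw [pvLoop, Function.iterate_succ_apply]
      by_cases h : fr = []
      · rw [if_pos h, h, show pvStep [] = [] from rfl, pvStep_iterate_nil]
      · rw [if_neg h, ih]

-- prepending a fixed token list to every partial distributes over one expansion + collection
theorem pvShift (k : Nat) (pre : List String) (s : List Char) :
    ∀ regs : List (List Char),
      (regs.filterMap (fun reg =>
          if reg.isPrefixOf s then some (pre ++ [String.ofList reg], s.drop reg.length) else none)).flatMap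
          (fun q => (pvRes k q.2).map (fun t => q.1 ++ t))
        = ((regs.filterMap (fun reg =>
            if reg.isPrefixOf s then some (([] : List String) ++ [String.ofList reg], s.drop reg.length) else none)).flatMap
            (fun q => (pvRes k q.2).map (fun t => q.1 ++ t))).map (fun t => pre ++ t)
  | [] => rfl
  | reg :: regs => by
      by_cases hpre : reg.isPrefixOf s = true
      · simp only [List.filterMap_cons, if_pos hpre, List.flatMap_cons, List.map_append]
        rw [pvShift k pre s regs]
        simp [List.map_map, Function.comp_def, List.append_assoc]
      · simp only [List.filterMap_cons, if_neg hpre]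
        exact pvShift k pre s regs

theorem pvFilterMap_done_iterate (k : Nat) :
    ∀ fr : List (List String × List Char),
      (pvStep^[k] fr).filterMap (fun p => if p.2 = [] then some p.1 else none)
        = fr.flatMap (fun p => (pvRes k p.2).map (fun t => p.1 ++ t)) := by
  induction k with
  | zero =>
      intro fr
      induction fr with
      | nil => rfl
      | cons p fr ih =>
          simp only [Function.iterate_zero, id_eq] at ih ⊢
          rw [List.filterMap_cons, List.flatMap_cons]
          by_cases hp : p.2 = [] <;> simp [hp, ih, pvRes_zero]
  | succ k ih =>
      intro fr
      rw [Function.iterate_succ_apply, ih]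
      show (pvStep fr).flatMap _ = _
      rw [pvStep, List.flatMap_assoc]
      refine List.flatMap_congr (fun p _ => ?_)
      have hres : pvRes (k+1) p.2
          = (pvRegsB.filterMap (fun reg =>
              if reg.isPrefixOf p.2 then
                some (([] : List String) ++ [String.ofList reg], p.2.drop reg.length)
              else none)).flatMap
              (fun q => (pvRes k q.2).map (fun t => q.1 ++ t)) := by
        rw [pvRes, Function.iterate_succ_apply, ih, pvStep]
        simp only [List.flatMap_cons, List.flatMap_nil, List.append_nil]
      rw [hres]
      exact pvShift k p.1 p.2 pvRegsB

theorem pvResSuccAux (k : Nat) (s : List Char) :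
    ∀ regs : List (List Char),
      (regs.filterMap (fun reg =>
          if reg.isPrefixOf s then some (([] : List String) ++ [String.ofList reg], s.drop reg.length) else none)).flatMap
          (fun q => (pvRes k q.2).map (fun t => q.1 ++ t))
        = regs.flatMap (fun reg =>
            if reg.isPrefixOf s then (pvRes k (s.drop reg.length)).map (fun t => String.ofList reg :: t) else [])
  | [] => rfl
  | reg :: regs => by
      by_cases hpre : reg.isPrefixOf s = true
      · simp only [List.filterMap_cons, if_pos hpre, List.flatMap_cons]
        rw [pvResSuccAux k s regs]
        simp
      · rw [List.filterMap_cons, if_neg hpre, List.flatMap_cons, if_neg hpre, List.nil_append]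
        exact pvResSuccAux k s regs

theorem pvRes_succ (k : Nat) (s : List Char) :
    pvRes (k+1) s
      = pvRegsB.flatMap (fun reg =>
          if reg.isPrefixOf s then (pvRes k (s.drop reg.length)).map (fun t => String.ofList reg :: t) else []) := by
  rw [pvRes, Function.iterate_succ_apply, pvFilterMap_done_iterate, pvStep]
  simp only [List.flatMap_cons, List.flatMap_nil, List.append_nil]
  exact pvResSuccAux k s pvRegsB

theorem pvPrefix_drop_nil_iff (reg s : List Char) :
    (reg.isPrefixOf s ∧ s.drop reg.length = []) ↔ s = reg := by
  constructor
  · rintro ⟨hp, hd⟩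
    have hp' : reg <+: s := by simpa [List.isPrefixOf_iff_prefix] using hp
    obtain ⟨t, ht⟩ := hp'
    subst ht
    simp at hd
    simp [hd]
  · rintro rfl
    simp [List.isPrefixOf_iff_prefix]

theorem pvFlatMap_single_not_mem (s : List Char) (regs : List (List Char)) (h : s ∉ regs) :
    regs.flatMap (fun reg => if s = reg then [[String.ofList reg]] else []) = [] := by
  induction regs with
  | nil => rfl
  | cons a l ih =>
      simp only [List.mem_cons, not_or] at h
      simp [h.1, ih h.2]

theorem pvFlatMap_single (s : List Char) :
    ∀ regs : List (List Char), regs.Nodup →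
      regs.flatMap (fun reg => if s = reg then [[String.ofList reg]] else [])
        = if s ∈ regs then [[String.ofList s]] else [] := by
  intro regs
  induction regs with
  | nil => intro _; rfl
  | cons a l ih =>
      intro hnd
      rcases List.nodup_cons.mp hnd with ⟨ha, hl⟩
      by_cases hsa : s = a
      · subst hsa
        simp [pvFlatMap_single_not_mem s l ha]
      · simp [hsa, ih hl]

theorem pvRes_one (s : List Char) :
    pvRes 1 s = if s ∈ pvRegsA then [[String.ofList s]] else [] := by
  rw [show (1 : Nat) = 0 + 1 from rfl, pvRes_succ, pvRegsB_eq]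
  rw [← pvFlatMap_single s pvRegsA pvRegsA_nodup]
  refine List.flatMap_congr (fun reg _ => ?_)
  by_cases hpre : reg.isPrefixOf s = true
  · by_cases hd : s.drop reg.length = []
    · have hs : s = reg := (pvPrefix_drop_nil_iff reg s).mp ⟨hpre, hd⟩
      simp [pvRes_zero, hs]
    · have hs : ¬ s = reg := fun h => hd ((pvPrefix_drop_nil_iff reg s).mpr h).2
      simp [hpre, pvRes_zero, hd, hs]
  · have hs : ¬ s = reg := by
      rintro rfl
      exact hpre (by simp [List.isPrefixOf_iff_prefix])
    simp [hpre, hs]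

theorem pvGoRegs_eq_flatMap (s : List Char) (n : Int) (regs : List (List Char)) :
    pvGoRegs s n regs
      = regs.flatMap (fun reg =>
          if reg ≠ [] ∧ s.take reg.length = reg then
            (match pvHardAux (s.drop reg.length) (n - 1) with
             | none => []
             | some possible => possible.map (fun pos => String.ofList reg :: pos))
          else []) := by
  induction regs with
  | nil => simp [pvGoRegs]
  | cons reg rest ih =>
      rw [pvGoRegs, ih, List.flatMap_cons]
      by_cases h : reg ≠ [] ∧ s.take reg.length = reg
      · simp [h]
      · simp [h]

theorem pvHardAux_nonpos : ∀ (len : Nat) (s : List Char), s.length = len →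
    ∀ n : Int, n ≤ 0 → pvHardAux s n = none := by
  intro len
  induction len using Nat.strong_induction_on with
  | _ len ihlen =>
      intro s hlen n hn
      rw [pvHardAux, if_neg (by omega)]
      have hgo : pvGoRegs s n pvRegsA = [] := by
        rw [pvGoRegs_eq_flatMap]
        refine List.flatMap_eq_nil_iff.mpr (fun reg _ => ?_)
        by_cases h : reg ≠ [] ∧ s.take reg.length = reg
        · have hle : reg.length ≤ s.length := by
            have := congrArg List.length h.2
            simp at this
            omega
          have hpos : 0 < reg.length := List.length_pos_of_ne_nil h.1
          have hrec : pvHardAux (s.drop reg.length) (n - 1) = none := by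
            refine ihlen (s.drop reg.length).length ?_ _ rfl _ (by omega)
            simp
            omega
          simp [h, hrec]
        · simp [h]
      simp [hgo]

theorem pvHardAux_pos : ∀ (k : Nat) (s : List Char),
    pvHardAux s ((k : Int) + 1)
      = if pvRes (k+1) s = [] then none else some (pvRes (k+1) s) := by
  intro k
  induction k with
  | zero =>
      intro s
      rw [pvHardAux, if_pos (by norm_num)]
      have h1 : pvRes (0+1) s = if s ∈ pvRegsA then [[String.ofList s]] else [] := pvRes_one s
      rw [h1]
      by_cases h : s ∈ pvRegsA <;> simp [h]
  | succ k ih =>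
      intro s
      rw [pvHardAux, if_neg (by push_cast; omega)]
      have hposs : pvGoRegs s ((((k : Nat) + 1 : Nat) : Int) + 1) pvRegsA = pvRes (k+1+1) s := by
        rw [pvGoRegs_eq_flatMap, pvRes_succ, pvRegsB_eq]
        refine List.flatMap_congr (fun reg hreg => ?_)
        have hpre_iff : (reg ≠ [] ∧ s.take reg.length = reg) ↔ reg.isPrefixOf s = true := by
          constructor
          · rintro ⟨-, ht⟩
            rw [List.isPrefixOf_iff_prefix]
            have htd := List.take_append_drop reg.length s
            rw [ht] at htd
            exact ⟨_, htd⟩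
          · intro hp
            refine ⟨pvRegsA_ne_nil reg hreg, ?_⟩
            rw [List.isPrefixOf_iff_prefix] at hp
            obtain ⟨t, rfl⟩ := hp
            simp
        have harg : ((((k : Nat) + 1 : Nat) : Int) + 1) - 1 = (k : Int) + 1 := by push_cast; ring
        by_cases h : reg ≠ [] ∧ s.take reg.length = reg
        · have hp : reg.isPrefixOf s = true := hpre_iff.mp h
          rw [if_pos h, if_pos hp, harg, ih]
          by_cases hres : pvRes (k+1) (s.drop reg.length) = []
          · simp [hres]
          · simp [hres]
        · rw [if_neg h, if_neg (fun hp => h (hpre_iff.mpr hp))]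
      rw [hposs]
      by_cases hres : pvRes (k+1+1) s = []
      · simp [hres]
      · simp [hres, List.length_eq_zero_iff]

-- ===== VERDICT (by name: the statement is the Claim_ definition above) =====
theorem hard_extract_n_r_spec : Claim_equal_hard_extract_n_r := by
  intro line n _
  show hard_extract_n_r line n = hard_extract_n_r_alt line n
  rw [hard_extract_n_r, hard_extract_n_r_alt]
  by_cases hn : n < 1
  · rw [if_pos hn, pvHardAux_nonpos line.toList.length line.toList rfl n (by omega)]
  · rw [if_neg hn]
    obtain ⟨k, hk⟩ : ∃ k : Nat, n = (k : Int) + 1 := ⟨(n - 1).toNat, by omega⟩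
    have hkn : n.toNat = k + 1 := by omega
    rw [hk, pvHardAux_pos k line.toList]
    have hkn' : ((k : Int) + 1).toNat = k + 1 := by omega
    simp only [hkn', pvLoop_eq_iterate]
    rfl
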